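-- pv_equiv track=rewrite | github.com/JakJach/Alpha-Miner | alpha_miner/footprint_matrix.py | init_events
-- ===== SOURCE A (Python) =====
-- def init_events(log):
--     all_events = []
--     for row in log:
--         for event in row:
--             if event not in all_events:
--                 all_events.append(event)
--     all_events = sorted(all_events)
--     return all_events
-- ===== SOURCE B (Python) =====
-- def init_events(log):
--     flat = []
--     for row in log:
--         flat.extend(row)
--     flat = sorted(flat)
--     result = []
--     for e in flat:
--         if not result or result[-1] != e:
--             result.append(e)
--     return result
-- ===== Notes on version B (the rewrite author's own statement) =====
-- stated objective: faster
-- what changed: Replaces the quadratic membership-scan dedup (event not in all_events) by flattening all rows, sorting once, and collapsing adjacent duplicates in a single pass.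
import Mathlib
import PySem

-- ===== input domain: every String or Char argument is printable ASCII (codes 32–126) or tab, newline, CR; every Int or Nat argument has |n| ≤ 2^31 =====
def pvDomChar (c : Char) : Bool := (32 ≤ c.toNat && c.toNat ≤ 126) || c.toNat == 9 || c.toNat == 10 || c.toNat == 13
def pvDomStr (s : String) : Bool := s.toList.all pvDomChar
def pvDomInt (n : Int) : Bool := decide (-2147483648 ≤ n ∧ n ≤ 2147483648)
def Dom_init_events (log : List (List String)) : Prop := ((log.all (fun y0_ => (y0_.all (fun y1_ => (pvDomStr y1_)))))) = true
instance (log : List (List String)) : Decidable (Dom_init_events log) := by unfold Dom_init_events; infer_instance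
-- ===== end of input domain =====

-- B replaces A's quadratic membership-scan dedup by flatten + one sort + an adjacent-duplicate collapse pass (faster algorithm).


-- ===== PORT A =====
-- literal port: build all_events by the nested loop with a list-membership test, then sorted()
def init_events (log : List (List String)) : List String :=
  let all_events : List String :=
    log.foldl (fun acc row =>
      row.foldl (fun acc event => if event ∈ acc then acc else acc ++ [event]) acc) []
  PySem.List.sorted all_events (fun x => x) false

-- ===== PORT B =====
-- literal port of Source B: flatten, sort once, collapse adjacent duplicates
-- (result[-1] on the nonempty accumulator is List.getLast?)
def init_events_alt (log : List (List String)) : List String :=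
  let flat : List String := log.foldl (fun acc row => acc ++ row) []
  let sortedFlat : List String := PySem.List.sorted flat (fun x => x) false
  sortedFlat.foldl (fun result e =>
    if result.getLast? = some e then result else result ++ [e]) []

-- ===== PRECONDITION & SPEC =====
def Spec_init_events (log : List (List String)) (out : List String) : Prop := out = init_events_alt log
instance (log : List (List String)) (out : List String) : Decidable (Spec_init_events log out) := by unfold Spec_init_events; infer_instance

-- ===== CLAIM (what is proved, stated in full; the proofs are below) =====
def Claim_equal_init_events : Prop := ∀ (log : List (List String)), Dom_init_events log → Spec_init_events log (init_events log)

-- ===== LEMMAS AND PROOFS =====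

-- recursive description of B's collapse loop (prev = last element already emitted)
def goCollapse (p : String) : List String → List String
  | [] => []
  | x :: l => if x = p then goCollapse p l else x :: goCollapse x l

theorem goCollapse_cons_self (p : String) (l : List String) :
    goCollapse p (p :: l) = goCollapse p l := by simp [goCollapse]

theorem goCollapse_cons_ne (p x : String) (l : List String) (h : x ≠ p) :
    goCollapse p (x :: l) = x :: goCollapse x l := by simp [goCollapse, h]

theorem collapse_foldl (l : List String) :
    ∀ (acc : List String) (p : String), acc.getLast? = some p →
      l.foldl (fun result e => if result.getLast? = some e then result else result ++ [e]) acc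
        = acc ++ goCollapse p l := by
  induction l with
  | nil => intro acc p _; simp [goCollapse]
  | cons x l ih =>
    intro acc p hlast
    by_cases hx : x = p
    · subst hx
      simp [List.foldl, hlast, goCollapse_cons_self, ih acc x hlast]
    · have hne : acc.getLast? ≠ some x := by rw [hlast]; simp [Ne.symm hx]
      have hlast' : (acc ++ [x]).getLast? = some x := by simp
      simp only [List.foldl, if_neg hne, goCollapse_cons_ne p x l hx,
        ih (acc ++ [x]) x hlast']
      simp

theorem goCollapse_mem_pairwise (l : List String) :
    ∀ p, l.Pairwise (· ≤ ·) → (∀ x ∈ l, p ≤ x) →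
      ((∀ y, y ∈ goCollapse p l ↔ (y ∈ l ∧ y ≠ p)) ∧
        (goCollapse p l).Pairwise (· < ·) ∧ (∀ y ∈ goCollapse p l, p < y)) := by
  induction l with
  | nil => intro p _ _; simp [goCollapse]
  | cons x l ih =>
    intro p hp hg
    have hpl : l.Pairwise (· ≤ ·) := hp.tail
    have hg' : ∀ y ∈ l, x ≤ y := fun y hy => List.rel_of_pairwise_cons hp hy
    obtain ⟨hm, hpw, hlt⟩ := ih x hpl hg'
    by_cases hx : x = p
    · subst hx
      refine ⟨?_, by simpa [goCollapse_cons_self] using hpw,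
        by simpa [goCollapse_cons_self] using hlt⟩
      intro y
      rw [goCollapse_cons_self, hm y]
      simp only [List.mem_cons]
      tauto
    · have hpx : p < x := lt_of_le_of_ne (hg x (by simp)) (Ne.symm hx)
      refine ⟨?_, ?_, ?_⟩
      · intro y
        rw [goCollapse_cons_ne p x l hx]
        simp only [List.mem_cons, hm]
        constructor
        · rintro (rfl | ⟨h1, _⟩)
          · exact ⟨Or.inl rfl, Ne.symm (ne_of_lt hpx)⟩
          · exact ⟨Or.inr h1, Ne.symm (ne_of_lt (lt_of_lt_of_le hpx (hg' y h1)))⟩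
        · rintro ⟨h1 | h1, h2⟩
          · exact Or.inl h1
          · by_cases hyx : y = x
            · exact Or.inl hyx
            · exact Or.inr ⟨h1, hyx⟩
      · rw [goCollapse_cons_ne p x l hx]
        exact List.pairwise_cons.mpr ⟨hlt, hpw⟩
      · intro y hy
        rw [goCollapse_cons_ne p x l hx, List.mem_cons] at hy
        rcases hy with rfl | hy
        · exact hpx
        · exact lt_trans hpx (hlt y hy)

-- B's collapse of any ≤-sorted list: strictly increasing, same membership
theorem collapse_spec (s : List String) (hs : s.Pairwise (· ≤ ·)) :
    (∀ y, y ∈ s.foldl (fun result e => if result.getLast? = some e then result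
        else result ++ [e]) [] ↔ y ∈ s) ∧
      (s.foldl (fun result e => if result.getLast? = some e then result
        else result ++ [e]) []).Pairwise (· < ·) := by
  cases s with
  | nil => simp
  | cons a t =>
    have ht : t.Pairwise (· ≤ ·) := hs.tail
    have hg : ∀ x ∈ t, a ≤ x := fun x hx => List.rel_of_pairwise_cons hs hx
    obtain ⟨hm, hpw, hlt⟩ := goCollapse_mem_pairwise t a ht hg
    have hys : (a :: t).foldl (fun result e => if result.getLast? = some e then result
        else result ++ [e]) [] = a :: goCollapse a t := by
      have h0 : (if ([] : List String).getLast? = some a then ([] : List String)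
          else [] ++ [a]) = [a] := by simp
      rw [List.foldl_cons, h0, collapse_foldl t [a] a (by simp)]
      simp
    rw [hys]
    refine ⟨?_, List.pairwise_cons.mpr ⟨hlt, hpw⟩⟩
    intro y
    simp only [List.mem_cons, hm]
    constructor
    · rintro (rfl | ⟨h1, _⟩)
      · exact Or.inl rfl
      · exact Or.inr h1
    · rintro (rfl | h1)
      · exact Or.inl rfl
      · by_cases hya : y = a
        · exact Or.inl hya
        · exact Or.inr ⟨h1, hya⟩

-- A's dedup accumulator: nodup and membership
theorem dedup_row_foldl (row : List String) :
    ∀ acc : List String, acc.Nodup →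
      let r := row.foldl (fun acc event => if event ∈ acc then acc else acc ++ [event]) acc
      r.Nodup ∧ ∀ y, y ∈ r ↔ (y ∈ acc ∨ y ∈ row) := by
  induction row with
  | nil => intro acc h; exact ⟨h, by simp⟩
  | cons x row ih =>
    intro acc hnd
    by_cases hx : x ∈ acc
    · obtain ⟨h1, h2⟩ := ih acc hnd
      refine ⟨by simpa [List.foldl, hx] using h1, ?_⟩
      intro y
      simp only [List.foldl, if_pos hx]
      rw [h2 y]
      simp only [List.mem_cons]
      constructor
      · rintro (h | h); exacts [Or.inl h, Or.inr (Or.inr h)]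
      · rintro (h | rfl | h); exacts [Or.inl h, Or.inl hx, Or.inr h]
    · have hnd' : (acc ++ [x]).Nodup := by
        rw [List.nodup_append]
        refine ⟨hnd, List.nodup_singleton x, ?_⟩
        intro a ha b hb
        simp only [List.mem_singleton] at hb
        subst hb
        exact fun h => hx (h ▸ ha)
      obtain ⟨h1, h2⟩ := ih (acc ++ [x]) hnd'
      refine ⟨by simpa [List.foldl, hx] using h1, ?_⟩
      intro y
      simp only [List.foldl, if_neg hx]
      rw [h2 y]
      simp only [List.mem_append, List.mem_cons]
      tauto

theorem dedup_log_foldl (log : List (List String)) :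
    ∀ acc : List String, acc.Nodup →
      let r := log.foldl (fun acc row =>
        row.foldl (fun acc event => if event ∈ acc then acc else acc ++ [event]) acc) acc
      r.Nodup ∧ ∀ y, y ∈ r ↔ (y ∈ acc ∨ ∃ row ∈ log, y ∈ row) := by
  induction log with
  | nil => intro acc h; exact ⟨h, by simp⟩
  | cons row log ih =>
    intro acc hnd
    obtain ⟨h1, h2⟩ := dedup_row_foldl row acc hnd
    obtain ⟨h3, h4⟩ := ih _ h1
    refine ⟨h3, ?_⟩
    intro y
    rw [List.foldl_cons, h4 y, h2 y]
    simp only [List.mem_cons]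
    constructor
    · rintro ((h | h) | ⟨r, hr, hy⟩)
      exacts [Or.inl h, Or.inr ⟨row, Or.inl rfl, h⟩, Or.inr ⟨r, Or.inr hr, hy⟩]
    · rintro (h | ⟨r, rfl | hr, hy⟩)
      exacts [Or.inl (Or.inl h), Or.inl (Or.inr hy), Or.inr ⟨r, hr, hy⟩]

theorem flat_foldl_mem (log : List (List String)) :
    ∀ acc : List String, ∀ y,
      y ∈ log.foldl (fun acc row => acc ++ row) acc ↔ (y ∈ acc ∨ ∃ row ∈ log, y ∈ row) := by
  induction log with
  | nil => intro acc y; simp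
  | cons row log ih =>
    intro acc y
    simp only [List.foldl, ih, List.mem_append, List.mem_cons]
    constructor
    · rintro ((h | h) | ⟨r, hr, hy⟩)
      exacts [Or.inl h, Or.inr ⟨row, Or.inl rfl, h⟩, Or.inr ⟨r, Or.inr hr, hy⟩]
    · rintro (h | ⟨r, rfl | hr, hy⟩)
      exacts [Or.inl (Or.inl h), Or.inl (Or.inr hy), Or.inr ⟨r, hr, hy⟩]

-- ===== VERDICT (by name: the statement is the Claim_ definition above) =====
theorem init_events_spec : Claim_equal_init_events := by
  intro log _
  unfold Spec_init_events init_events init_events_alt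
  dsimp only
  obtain ⟨hmem, hpw⟩ := collapse_spec
    (PySem.List.sorted (log.foldl (fun acc row => acc ++ row) []) (fun x => x) false)
    (PySem.List.sorted_pairwise _ _)
  obtain ⟨hnd, hmA⟩ := dedup_log_foldl log [] (by simp)
  have hysnd := hpw.imp (fun h => ne_of_lt h)
  have hperm := (List.perm_ext_iff_of_nodup hysnd hnd).mpr (by
    intro y
    rw [hmem y, PySem.List.mem_sorted, hmA y, flat_foldl_mem log [] y])
  exact (PySem.List.sorted_eq_of_perm_of_pairwise_lt _ _ (fun x => x) hperm hpw)
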